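-- pv_equiv track=rewrite | github.com/JavianDev/Brevit.py | src/brevit.py | _is_uniform_object_array
-- ===== SOURCE A (Python) =====
-- def _is_uniform_object_array(arr: list) -> tuple[list[str] | None, bool]:
--     """Checks if an array contains uniform objects (all have same keys)."""
--     if not arr or not isinstance(arr, list):
--         return None, False
--
--     first_item = arr[0]
--     if not isinstance(first_item, dict):
--         return None, False
--
--     # Preserve original field order instead of sorting
--     first_keys = list(first_item.keys())
--     first_key_set = set(first_keys)
--
--     # Check if all items have the same keys (order-independent)
--     for item in arr[1:]:
--         if not isinstance(item, dict):
--             return None, False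
--         item_keys = list(item.keys())
--         if len(first_keys) != len(item_keys):
--             return None, False
--         # Check if all keys exist (order doesn't matter for uniformity)
--         if not all(key in first_key_set for key in item_keys):
--             return None, False
--
--     return first_keys, True
-- ===== SOURCE B (Python) =====
-- def _is_uniform_object_array(arr: list) -> tuple[list[str] | None, bool]:
--     """Checks if an array contains uniform objects (all have same keys)."""
--     if not arr or not isinstance(arr, list):
--         return None, False
--     if not all(isinstance(item, dict) for item in arr):
--         return None, False
--     # Collect the distinct key-signatures; uniform iff there is exactly one.
--     signatures = {tuple(sorted(item)) for item in arr}
--     if len(signatures) > 1: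
--         return None, False
--     return list(arr[0].keys()), True
-- ===== Notes on version B (the rewrite author's own statement) =====
-- stated objective: simpler
-- what changed: Replaces A's per-item comparison loop (length check plus membership of each key in the first dict's key set, with short-circuit) by one pass that collects the set of distinct sorted key-signatures and declares the array uniform iff that set has at most one element.
import Mathlib
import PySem

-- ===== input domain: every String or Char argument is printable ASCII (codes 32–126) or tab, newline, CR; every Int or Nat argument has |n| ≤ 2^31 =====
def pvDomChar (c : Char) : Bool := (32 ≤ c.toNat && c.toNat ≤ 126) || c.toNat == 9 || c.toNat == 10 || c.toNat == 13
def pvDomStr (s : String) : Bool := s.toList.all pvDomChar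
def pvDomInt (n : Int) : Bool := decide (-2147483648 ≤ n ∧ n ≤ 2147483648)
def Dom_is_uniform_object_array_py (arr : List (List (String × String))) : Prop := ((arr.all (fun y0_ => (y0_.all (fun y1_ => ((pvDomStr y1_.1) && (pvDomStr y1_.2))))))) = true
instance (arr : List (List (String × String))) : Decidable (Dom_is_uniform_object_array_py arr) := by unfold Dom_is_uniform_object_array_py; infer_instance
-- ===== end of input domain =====

-- B replaces A's per-item compare-with-first loop by counting distinct sorted key-signatures (simpler decomposition, same cost up to a sort).


-- ===== PORT A =====
-- the 'for item in arr[1:]' loop of A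
def isUniformLoopA (first_keys : List String) (first_key_set : PySem.Set String)
    (items : List (List (String × String))) : Option (List String) × Bool :=
  match items with
  | [] => (some first_keys, true)
  | item :: rest =>
    let item_keys := item.map Prod.fst
    if first_keys.length ≠ item_keys.length then (none, false)
    else if ¬ (item_keys.all (fun key => PySem.Set.contains first_key_set key)) then (none, false)
    else isUniformLoopA first_keys first_key_set rest

def is_uniform_object_array_py (arr : List (List (String × String))) : Option (List String) × Bool :=
  match arr with
  | [] => (none, false)
  | first_item :: rest =>
    let first_keys := first_item.map Prod.fst
    let first_key_set := PySem.Set.ofList first_keys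
    isUniformLoopA first_keys first_key_set rest

-- ===== PORT B =====
def is_uniform_object_array_py_alt (arr : List (List (String × String))) : Option (List String) × Bool :=
  match arr with
  | [] => (none, false)
  | first :: rest =>
    let signatures : PySem.Set (List String) :=
      PySem.Set.ofList ((first :: rest).map
        (fun item => PySem.List.sorted (item.map Prod.fst) (fun x => x) false))
    if PySem.Set.len signatures > 1 then (none, false)
    else (some (first.map Prod.fst), true)

-- ===== PRECONDITION & SPEC =====
-- Pre_ excludes association lists in which some inner list repeats a key: such a value does not
-- represent a Python dict (dict keys are unique), so A is never called on it.
def Pre_is_uniform_object_array_py (arr : List (List (String × String))) : Prop :=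
  ∀ d ∈ arr, (d.map Prod.fst).Nodup
instance (arr : List (List (String × String))) : Decidable (Pre_is_uniform_object_array_py arr) := by
  unfold Pre_is_uniform_object_array_py; infer_instance
def pvWitness_is_uniform_object_array_py : (List (List (String × String))) :=
  [[("a", "1"), ("b", "2")], [("b", "3"), ("a", "4")]]

def Spec_is_uniform_object_array_py (arr : List (List (String × String))) (out : Option (List String) × Bool) : Prop := out = is_uniform_object_array_py_alt arr
instance (arr : List (List (String × String))) (out : Option (List String) × Bool) : Decidable (Spec_is_uniform_object_array_py arr out) := by unfold Spec_is_uniform_object_array_py; infer_instance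

-- ===== CLAIM (what is proved, stated in full; the proofs are below) =====
def Claim_equal_is_uniform_object_array_py : Prop := ∀ (arr : List (List (String × String))), Dom_is_uniform_object_array_py arr → Pre_is_uniform_object_array_py arr → Spec_is_uniform_object_array_py arr (is_uniform_object_array_py arr)

-- ===== LEMMAS AND PROOFS =====

-- A's loop returns success iff every remaining item passes the length+membership test.
theorem isUniformLoopA_eq (fk : List String) (fset : PySem.Set String)
    (items : List (List (String × String))) :
    isUniformLoopA fk fset items =
      if items.all (fun item =>
            (fk.length == (item.map Prod.fst).length) &&
            (item.map Prod.fst).all (fun key => PySem.Set.contains fset key))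
      then (some fk, true) else (none, false) := by
  induction items with
  | nil => simp [isUniformLoopA]
  | cons item rest ih =>
    simp only [isUniformLoopA, ih, List.all_cons]
    by_cases h1 : fk.length = (item.map Prod.fst).length
    · rw [if_neg (not_not.2 h1)]
      by_cases h2 : ((item.map Prod.fst).all fun key => PySem.Set.contains fset key) = true
      · rw [if_neg (not_not.2 h2)]
        simp only [beq_iff_eq.mpr h1, h2, Bool.true_and]
      · rw [if_pos h2]
        simp only [Bool.and_eq_true]
        rw [if_neg (fun hc => h2 hc.1.2)]
    · rw [if_pos h1]
      simp only [Bool.and_eq_true, beq_iff_eq]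
      rw [if_neg (fun hc => h1 hc.1.1)]

-- set(x :: l) has more than one element iff some element of l differs from x.
theorem set_len_cons_gt_one_iff {α : Type} [BEq α] [LawfulBEq α] (x : α) (l : List α) :
    PySem.Set.len (PySem.Set.ofList (x :: l)) > (1 : Int) ↔ ¬ (∀ y ∈ l, y = x) := by
  rw [PySem.Set.ofList_cons]
  have hd : ((PySem.Set.ofList l).discard x = []) ↔ ∀ y ∈ l, y = x := by
    constructor
    · intro h y hy
      by_contra hne
      have hmem : y ∈ (PySem.Set.ofList l).discard x :=
        (PySem.Set.mem_discard _ _ _).2 ⟨(PySem.Set.mem_ofList _ _).2 hy, hne⟩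
      rw [h] at hmem
      simp at hmem
    · intro h
      apply List.eq_nil_iff_forall_not_mem.2
      intro y hy
      rw [PySem.Set.mem_discard, PySem.Set.mem_ofList] at hy
      exact hy.2 (h y hy.1)
  rw [← hd]
  constructor
  · intro hgt heq
    rw [heq] at hgt
    simp [PySem.Set.len] at hgt
  · intro hne
    have hp : 0 < ((PySem.Set.ofList l).discard x).length := List.length_pos_iff.2 hne
    simp only [PySem.Set.len, List.length_cons, gt_iff_lt]
    omega

-- For nodup key lists: equal length + inclusion ⟺ equal sorted key lists.
theorem keys_cond_iff_sorted_eq (fk ik : List String) (hik : ik.Nodup) :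
    (fk.length = ik.length ∧ ∀ k ∈ ik, k ∈ fk) ↔
      PySem.List.sorted ik (fun x => x) false = PySem.List.sorted fk (fun x => x) false := by
  constructor
  · rintro ⟨hlen, hsub⟩
    have hperm : ik.Perm fk := (hik.subperm hsub).perm_of_length_le (le_of_eq hlen)
    exact (PySem.List.sorted_id_eq_sorted_id_iff_perm ik fk).2 hperm
  · intro h
    have hperm : ik.Perm fk := (PySem.List.sorted_id_eq_sorted_id_iff_perm ik fk).1 h
    exact ⟨hperm.length_eq.symm, fun k hk => hperm.mem_iff.1 hk⟩

-- ===== VERDICT (by name: the statement is the Claim_ definition above) =====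
theorem is_uniform_object_array_py_spec : Claim_equal_is_uniform_object_array_py := by
  intro arr _ hpre
  unfold Spec_is_uniform_object_array_py
  cases arr with
  | nil => rfl
  | cons first rest =>
    simp only [is_uniform_object_array_py, is_uniform_object_array_py_alt,
      isUniformLoopA_eq, List.map_cons]
    have key : ∀ item ∈ rest,
        (((first.map Prod.fst).length == (item.map Prod.fst).length) &&
          (item.map Prod.fst).all
            (fun key => PySem.Set.contains (PySem.Set.ofList (first.map Prod.fst)) key)) = true ↔
        PySem.List.sorted (item.map Prod.fst) (fun x => x) false =
          PySem.List.sorted (first.map Prod.fst) (fun x => x) false := by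
      intro item hitem
      have hik : (item.map Prod.fst).Nodup := hpre item (List.mem_cons_of_mem _ hitem)
      rw [← keys_cond_iff_sorted_eq _ _ hik]
      simp [List.all_eq_true, PySem.Set.mem_ofList]
    by_cases hall : (rest.all (fun item =>
        ((first.map Prod.fst).length == (item.map Prod.fst).length) &&
        (item.map Prod.fst).all
          (fun key => PySem.Set.contains (PySem.Set.ofList (first.map Prod.fst)) key))) = true
    · have hsig : ∀ y ∈ rest.map (fun item => PySem.List.sorted (item.map Prod.fst) (fun x => x) false),
          y = PySem.List.sorted (first.map Prod.fst) (fun x => x) false := by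
        intro y hy
        obtain ⟨item, hitem, rfl⟩ := List.mem_map.1 hy
        exact (key item hitem).1 (List.all_eq_true.1 hall item hitem)
      rw [if_pos hall, if_neg (fun hgt => (set_len_cons_gt_one_iff _ _).1 hgt hsig)]
    · have hnsig : ¬ ∀ y ∈ rest.map (fun item => PySem.List.sorted (item.map Prod.fst) (fun x => x) false),
          y = PySem.List.sorted (first.map Prod.fst) (fun x => x) false := by
        intro hsig
        apply hall
        rw [List.all_eq_true]
        intro item hitem
        exact (key item hitem).2 (hsig _ (List.mem_map_of_mem hitem))
      rw [if_neg hall, if_pos ((set_len_cons_gt_one_iff _ _).2 hnsig)]
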